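-- pv_equiv track=rewrite | github.com/lawtech0902/py_imooc_algorithm | array/41_first_missing_positive.py | firstMissingPositive
-- ===== SOURCE A (Python) =====
-- def firstMissingPositive(nums):
--     """
--     :type nums: List[int]
--     :rtype: int
--     """
--     size = len(nums)
--     for i in range(size):
--         while 0 <= (nums[i] - 1) < size and nums[i] != nums[nums[i] - 1]:
--             tmp = nums[i] - 1
--             nums[i], nums[tmp] = nums[tmp], nums[i]
--     for i in range(size):
--         if nums[i] != i + 1:
--             return i + 1
--     return size + 1
-- ===== SOURCE B (Python) =====
-- def firstMissingPositive(nums):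
--     """
--     :type nums: List[int]
--     :rtype: int
--     """
--     present = set(nums)
--     for i in range(1, len(nums) + 1):
--         if i not in present:
--             return i
--     return len(nums) + 1
-- ===== Notes on version B (the rewrite author's own statement) =====
-- stated objective: simpler
-- what changed: Replaces the in-place cyclic-sort (swap each value into its slot, then scan for the first mismatch) with a membership set built once and a scan of the candidates 1..n; B also does not mutate the input list, unlike A.
import Mathlib
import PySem

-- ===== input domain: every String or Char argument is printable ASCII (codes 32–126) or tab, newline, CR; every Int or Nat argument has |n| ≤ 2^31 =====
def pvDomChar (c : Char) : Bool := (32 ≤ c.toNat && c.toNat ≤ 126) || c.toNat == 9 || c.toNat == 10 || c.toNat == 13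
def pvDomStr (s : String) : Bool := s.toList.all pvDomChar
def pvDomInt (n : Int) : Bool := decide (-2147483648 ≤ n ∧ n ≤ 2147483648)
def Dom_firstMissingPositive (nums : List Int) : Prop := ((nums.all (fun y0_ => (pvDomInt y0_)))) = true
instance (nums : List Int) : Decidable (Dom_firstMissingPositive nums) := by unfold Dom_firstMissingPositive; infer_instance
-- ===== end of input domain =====

-- B replaces A's in-place cyclic sort with a membership set and a scan of the candidates 1..n;
-- A mutates its argument in place, B does not: the equivalence proved here is about the return value only.

-- ===== PORT A =====
-- the inner 'while' of A: swap nums[i] towards its slot until the guard fails.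
-- The fuel argument only makes the recursion structural; each swap puts one more value
-- into its final slot, so length+1 units never run out (fmpSwapLoop_NG_self below).
def fmpSwapLoop (fuel : Nat) (i : Nat) (arr : List Int) : List Int :=
  match fuel with
  | 0 => arr
  | fuel + 1 =>
      if 0 ≤ arr.getD i 0 - 1 ∧ arr.getD i 0 - 1 < (arr.length : Int) ∧
         arr.getD i 0 ≠ arr.getD (arr.getD i 0 - 1).toNat 0 then
        fmpSwapLoop fuel i ((arr.set i (arr.getD (arr.getD i 0 - 1).toNat 0)).set
            (arr.getD i 0 - 1).toNat (arr.getD i 0))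
      else arr

-- the second 'for' of A: first index i with nums[i] ≠ i+1 wins, else size+1
def fmpScanGo (arr : List Int) (size : Nat) (l : List Nat) : Int :=
  match l with
  | [] => (size : Int) + 1
  | i :: rest => if arr.getD i 0 ≠ (i : Int) + 1 then (i : Int) + 1 else fmpScanGo arr size rest

def firstMissingPositive (nums : List Int) : Int :=
  fmpScanGo ((List.range nums.length).foldl (fun a i => fmpSwapLoop (a.length + 1) i a) nums)
    nums.length (List.range nums.length)

-- ===== PORT B =====
-- the 'for i in range(1, len(nums)+1)' of B: first candidate not in the set wins, else n+1
def fmpAltGo (s : List Int) (n : Nat) (l : List Nat) : Int :=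
  match l with
  | [] => (n : Int) + 1
  | i :: rest => if ((i : Int) ∈ s) then fmpAltGo s n rest else (i : Int)

def firstMissingPositive_alt (nums : List Int) : Int :=
  fmpAltGo (PySem.Set.ofList nums) nums.length (List.range' 1 nums.length)

-- ===== PRECONDITION & SPEC =====
def Spec_firstMissingPositive (nums : List Int) (out : Int) : Prop := out = firstMissingPositive_alt nums
instance (nums : List Int) (out : Int) : Decidable (Spec_firstMissingPositive nums out) := by unfold Spec_firstMissingPositive; infer_instance

-- ===== CLAIM (what is proved, stated in full; the proofs are below) =====
def Claim_equal_firstMissingPositive : Prop := ∀ (nums : List Int), Dom_firstMissingPositive nums → Spec_firstMissingPositive nums (firstMissingPositive nums)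

-- ===== LEMMAS AND PROOFS =====

-- getD after set, in one formula
theorem fmpGetD_set (l : List Int) (i j : Nat) (v : Int) :
    (l.set i v).getD j 0 = if i = j ∧ j < l.length then v else l.getD j 0 := by
  simp only [List.getD_eq_getElem?_getD, List.getElem?_set]
  by_cases h1 : i = j
  · subst h1
    by_cases h2 : i < l.length
    · simp [h2]
    · simp [h2]
  · simp [h1]

-- number of indices already holding their final value k+1
def fmpFixed (arr : List Int) : Nat :=
  ((Finset.range arr.length).filter (fun k => arr.getD k 0 = (k : Int) + 1)).card

-- each swap newly fixes position tmp and never unfixes a fixed position, so the measure drops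
theorem fmpFixed_swap_lt (i : Nat) (arr : List Int)
    (h : 0 ≤ arr.getD i 0 - 1 ∧ arr.getD i 0 - 1 < (arr.length : Int) ∧
         arr.getD i 0 ≠ arr.getD (arr.getD i 0 - 1).toNat 0) :
    ((arr.set i (arr.getD (arr.getD i 0 - 1).toNat 0)).set (arr.getD i 0 - 1).toNat
        (arr.getD i 0)).length -
      fmpFixed ((arr.set i (arr.getD (arr.getD i 0 - 1).toNat 0)).set (arr.getD i 0 - 1).toNat
        (arr.getD i 0)) <
    arr.length - fmpFixed arr := by
  obtain ⟨h1, h2, h3⟩ := h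
  set v := arr.getD i 0 with hv
  set tmp := (v - 1).toNat with htmp
  have htv : (tmp : Int) = v - 1 := Int.toNat_of_nonneg h1
  have htlen : tmp < arr.length := by omega
  have hne : i ≠ tmp := by
    intro hEq; apply h3; rw [← hEq]
  set arr' := (arr.set i (arr.getD tmp 0)).set tmp v with harr'
  have hlen : arr'.length = arr.length := by simp [harr']
  have hget : ∀ k, arr'.getD k 0 =
      if tmp = k ∧ k < arr.length then v
      else if i = k ∧ k < arr.length then arr.getD tmp 0 else arr.getD k 0 := by
    intro k
    rw [harr', fmpGetD_set, fmpGetD_set]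
    simp only [List.length_set]
  have hmono : (Finset.range arr.length).filter (fun k => arr.getD k 0 = (k : Int) + 1) ⊂
      (Finset.range arr'.length).filter (fun k => arr'.getD k 0 = (k : Int) + 1) := by
    constructor
    · intro k hk
      simp only [Finset.mem_filter, Finset.mem_range] at *
      obtain ⟨hk1, hk2⟩ := hk
      refine ⟨by omega, ?_⟩
      rw [hget k]
      by_cases hkt : tmp = k
      · simp [hkt]; omega
      · by_cases hki : i = k
        · exfalso; apply hkt; subst hki; omega
        · rw [if_neg (by tauto), if_neg (by tauto)]; exact hk2
    · intro hsub
      have := hsub (by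
        simp only [Finset.mem_filter, Finset.mem_range]
        refine ⟨by omega, ?_⟩
        rw [hget tmp]
        simp [htlen]; omega : tmp ∈ _)
      simp only [Finset.mem_filter, Finset.mem_range] at this
      apply h3
      rw [this.2]; omega
  have hcard := Finset.card_lt_card hmono
  have hb : ((Finset.range arr'.length).filter (fun k => arr'.getD k 0 = (k : Int) + 1)).card ≤
      arr'.length := le_trans (Finset.card_filter_le _ _) (by simp)
  unfold fmpFixed
  omega

-- "no guard": the while-loop guard of A is false at index j
def fmpNG (arr : List Int) (j : Nat) : Prop :=
  ¬(0 ≤ arr.getD j 0 - 1 ∧ arr.getD j 0 - 1 < (arr.length : Int) ∧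
    arr.getD j 0 ≠ arr.getD (arr.getD j 0 - 1).toNat 0)

-- a single swap preserves membership (both positions are in range)
theorem fmpSwap_mem (l : List Int) (i j : Nat) (hi : i < l.length) (hj : j < l.length) (x : Int) :
    (x ∈ (l.set i (l.getD j 0)).set j (l.getD i 0)) ↔ x ∈ l := by
  rw [List.getD_eq_getElem _ _ hi, List.getD_eq_getElem _ _ hj]
  by_cases hij : i = j
  · subst hij
    rw [List.set_getElem_self hi]
    rw [List.set_getElem_self hi]
  · constructor
    · intro hx
      obtain ⟨p, hp, hpe⟩ := List.mem_iff_getElem.mp hx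
      simp only [List.length_set] at hp
      rw [List.getElem_set, List.getElem_set] at hpe
      split_ifs at hpe with hjp hip
      · exact hpe ▸ List.getElem_mem hi
      · exact hpe ▸ List.getElem_mem hj
      · exact hpe ▸ List.getElem_mem hp
    · intro hx
      obtain ⟨p, hp, hpe⟩ := List.mem_iff_getElem.mp hx
      refine List.mem_iff_getElem.mpr ⟨if p = i then j else if p = j then i else p, by
        simp only [List.length_set]; split_ifs <;> omega, ?_⟩
      rw [List.getElem_set, List.getElem_set]
      split_ifs with hpi hpj <;> simp_all

-- a single swap preserves fmpNG at every index
theorem fmpNG_swap (arr : List Int) (i : Nat)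
    (h1 : 0 ≤ arr.getD i 0 - 1) (h2 : arr.getD i 0 - 1 < (arr.length : Int))
    (h3 : arr.getD i 0 ≠ arr.getD (arr.getD i 0 - 1).toNat 0) (j : Nat)
    (hj : fmpNG arr j) :
    fmpNG ((arr.set i (arr.getD (arr.getD i 0 - 1).toNat 0)).set
        (arr.getD i 0 - 1).toNat (arr.getD i 0)) j := by
  set v := arr.getD i 0 with hv
  set tmp := (v - 1).toNat with htmp
  have htv : (tmp : Int) = v - 1 := Int.toNat_of_nonneg h1
  have htlen : tmp < arr.length := by omega
  have hne : i ≠ tmp := by intro hEq; apply h3; rw [← hEq]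
  set arr' := (arr.set i (arr.getD tmp 0)).set tmp v with harr'
  have hlen : arr'.length = arr.length := by simp [harr']
  have hget : ∀ k, arr'.getD k 0 =
      if tmp = k ∧ k < arr.length then v
      else if i = k ∧ k < arr.length then arr.getD tmp 0 else arr.getD k 0 := by
    intro k
    rw [harr', fmpGetD_set, fmpGetD_set]
    simp only [List.length_set]
  rintro ⟨g1, g2, g3⟩
  rw [hlen] at g2
  by_cases hjt : j = tmp
  · -- slot tmp now holds tmp+1: the guard cannot fire there
    subst hjt
    have hval : arr'.getD tmp 0 = v := by rw [hget tmp]; simp [htlen]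
    rw [hval] at g3
    apply g3
    have hh : (v - 1).toNat = tmp := htmp.symm
    rw [hh, hval]
  · by_cases hji : j = i
    · -- at index i the old guard held, contradicting hj
      subst hji
      exact hj ⟨h1, h2, h3⟩
    · -- untouched index: its target slot either kept its value or became correct
      have hval : arr'.getD j 0 = arr.getD j 0 := by
        rw [hget j]
        rw [if_neg (by exact fun hc => hjt hc.1.symm), if_neg (by exact fun hc => hji hc.1.symm)]
      rw [hval] at g1 g2 g3
      set w := arr.getD j 0 with hw
      set q := (w - 1).toNat with hq
      have hqw : (q : Int) = w - 1 := Int.toNat_of_nonneg g1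
      have hqlen : q < arr.length := by omega
      have hmain : w = arr.getD q 0 := by
        by_contra hne2
        exact hj ⟨g1, g2, hne2⟩
      apply g3
      rw [hget q]
      by_cases hqt : tmp = q
      · rw [if_pos ⟨hqt, hqlen⟩]; omega
      · by_cases hqi : i = q
        · exfalso
          have hvw : v = w := by rw [hv, hqi]; exact hmain.symm
          exact hne (by omega)
        · rw [if_neg (by tauto), if_neg (by tauto)]
          exact hmain

theorem fmpSwapLoop_length (fuel i : Nat) (arr : List Int) :
    (fmpSwapLoop fuel i arr).length = arr.length := by
  induction fuel generalizing arr with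
  | zero => rfl
  | succ f ih =>
      rw [fmpSwapLoop]
      split
      · rw [ih]; simp
      · rfl

theorem fmpSwapLoop_mem (fuel i : Nat) (arr : List Int) (x : Int) :
    x ∈ fmpSwapLoop fuel i arr ↔ x ∈ arr := by
  induction fuel generalizing arr with
  | zero => exact Iff.rfl
  | succ f ih =>
      rw [fmpSwapLoop]
      split
      · next h =>
          rw [ih]
          obtain ⟨h1, h2, h3⟩ := h
          have hi : i < arr.length := by
            by_contra hbad
            rw [List.getD_eq_getElem?_getD, List.getElem?_eq_none (by omega)] at h1
            simp at h1
          exact fmpSwap_mem arr i _ hi (by omega) x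
      · exact Iff.rfl

theorem fmpSwapLoop_NG (fuel i : Nat) (arr : List Int) (j : Nat) (hj : fmpNG arr j) :
    fmpNG (fmpSwapLoop fuel i arr) j := by
  induction fuel generalizing arr with
  | zero => exact hj
  | succ f ih =>
      rw [fmpSwapLoop]
      split
      · next h => exact ih _ (fmpNG_swap arr i h.1 h.2.1 h.2.2 j hj)
      · exact hj

-- the fuel a.length + 1 is always enough: at exit the guard at index i is false
theorem fmpSwapLoop_NG_self (fuel i : Nat) (arr : List Int)
    (hfuel : arr.length - fmpFixed arr < fuel) : fmpNG (fmpSwapLoop fuel i arr) i := by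
  induction fuel generalizing arr with
  | zero => omega
  | succ f ih =>
      rw [fmpSwapLoop]
      split
      · next h =>
          apply ih
          have := fmpFixed_swap_lt i arr h
          omega
      · next h => exact h

theorem fmpPhase1_length (l : List Nat) (arr : List Int) :
    (l.foldl (fun a i => fmpSwapLoop (a.length + 1) i a) arr).length = arr.length := by
  induction l generalizing arr with
  | nil => rfl
  | cons a l ih => simp only [List.foldl_cons]; rw [ih, fmpSwapLoop_length]

theorem fmpPhase1_mem (l : List Nat) (arr : List Int) (x : Int) :
    (x ∈ l.foldl (fun a i => fmpSwapLoop (a.length + 1) i a) arr) ↔ x ∈ arr := by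
  induction l generalizing arr with
  | nil => exact Iff.rfl
  | cons a l ih => simp only [List.foldl_cons]; rw [ih, fmpSwapLoop_mem]

theorem fmpPhase1_NG (l : List Nat) (arr : List Int) (j : Nat) (h : j ∈ l ∨ fmpNG arr j) :
    fmpNG (l.foldl (fun a i => fmpSwapLoop (a.length + 1) i a) arr) j := by
  induction l generalizing arr with
  | nil => simpa using h
  | cons a l ih =>
      simp only [List.foldl_cons]
      rcases h with h | h
      · rcases List.mem_cons.mp h with rfl | hmem
        · exact ih _ (Or.inr (fmpSwapLoop_NG_self (arr.length + 1) j arr (by omega)))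
        · exact ih _ (Or.inl hmem)
      · exact ih _ (Or.inr (fmpSwapLoop_NG (arr.length + 1) a arr j h))

-- the two scans agree when the pointwise conditions are equivalent
theorem fmpScanGo_eq_alt (arr s : List Int) (n : Nat)
    (hchar : ∀ k, k < n → (arr.getD k 0 = (k : Int) + 1 ↔ ((k : Int) + 1) ∈ s))
    (k i : Nat) (hk : i + k = n) :
    fmpScanGo arr n (List.range' i k) = fmpAltGo s n (List.range' (i + 1) k) := by
  induction k generalizing i with
  | zero => rfl
  | succ m ih =>
      rw [List.range'_succ, List.range'_succ]
      rw [fmpScanGo, fmpAltGo]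
      by_cases hc : arr.getD i 0 = (i : Int) + 1
      · rw [if_neg (by simpa using hc), if_pos (by push_cast; exact (hchar i (by omega)).mp hc)]
        exact ih (i + 1) (by omega)
      · rw [if_pos (by simpa using hc), if_neg (by push_cast; exact fun hm => hc ((hchar i (by omega)).mpr hm))]
        push_cast; ring

-- the final array holds k+1 at slot k exactly when k+1 occurs in the input
theorem fmpChar (nums : List Int) (k : Nat) (hk : k < nums.length) :
    (((List.range nums.length).foldl (fun a i => fmpSwapLoop (a.length + 1) i a) nums).getD k 0
        = (k : Int) + 1
      ↔ ((k : Int) + 1) ∈ nums) := by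
  set final := (List.range nums.length).foldl (fun a i => fmpSwapLoop (a.length + 1) i a) nums
    with hfin
  have hlen : final.length = nums.length := fmpPhase1_length _ _
  constructor
  · intro h
    rw [← fmpPhase1_mem (List.range nums.length) nums ((k : Int) + 1), ← hfin]
    rw [List.getD_eq_getElem _ _ (by omega)] at h
    exact h ▸ List.getElem_mem _
  · intro h
    rw [← fmpPhase1_mem (List.range nums.length) nums ((k : Int) + 1), ← hfin] at h
    obtain ⟨p, hp, hpe⟩ := List.mem_iff_getElem.mp h
    have hng : fmpNG final p := fmpPhase1_NG _ _ _ (Or.inl (by simp; omega))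
    unfold fmpNG at hng
    rw [List.getD_eq_getElem _ _ hp, hpe] at hng
    simp only [not_and, not_not] at hng
    have := hng (by omega) (by omega)
    have hkk : ((k : Int) + 1 - 1).toNat = k := by omega
    rw [hkk] at this
    exact this.symm

-- ===== VERDICT (by name: the statement is the Claim_ definition above) =====
theorem firstMissingPositive_spec : Claim_equal_firstMissingPositive := by
  intro nums _
  unfold Spec_firstMissingPositive firstMissingPositive firstMissingPositive_alt
  rw [List.range_eq_range']
  refine fmpScanGo_eq_alt _ (PySem.Set.ofList nums) nums.length (fun k hk => ?_)
    nums.length 0 (by omega)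
  rw [← List.range_eq_range', fmpChar nums k hk, PySem.Set.mem_ofList]
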